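-- pv_equiv track=rewrite | github.com/burgerfacegirl/Algorithm | programmers/코딩테스트연습/level_1/문자열내마음대로정렬하기.py | solution
-- ===== SOURCE A (Python) =====
-- def solution(strings, n):
--     k = []
--     for idx, word in enumerate(strings):
--         k.append([word[n], idx])
--
--     k.sort()
--     temp = []
--     for ss in k:
--         temp.append([strings[ss[1]], ss[0]])
--
--     temp.sort(key=lambda x: (x[1], x[0]))
--
--     answer = []
--     for word in temp:
--         answer.append(word[0])
--     return answer
-- ===== SOURCE B (Python) =====
-- def solution(strings, n):
--     ordered = sorted(strings)
--     chars = sorted({w[n] for w in ordered})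
--     answer = []
--     for ch in chars:
--         for w in ordered:
--             if w[n] == ch:
--                 answer.append(w)
--     return answer
-- ===== Notes on version B (the rewrite author's own statement) =====
-- stated objective: alternative
-- what changed: Replaces A's composite-key sorting of intermediate [char, idx] / [word, char] lists with a bucket/partition algorithm: sort the words lexicographically once, collect the distinct nth characters, and emit the buckets in character order by scanning the sorted list per character.
import Mathlib
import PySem

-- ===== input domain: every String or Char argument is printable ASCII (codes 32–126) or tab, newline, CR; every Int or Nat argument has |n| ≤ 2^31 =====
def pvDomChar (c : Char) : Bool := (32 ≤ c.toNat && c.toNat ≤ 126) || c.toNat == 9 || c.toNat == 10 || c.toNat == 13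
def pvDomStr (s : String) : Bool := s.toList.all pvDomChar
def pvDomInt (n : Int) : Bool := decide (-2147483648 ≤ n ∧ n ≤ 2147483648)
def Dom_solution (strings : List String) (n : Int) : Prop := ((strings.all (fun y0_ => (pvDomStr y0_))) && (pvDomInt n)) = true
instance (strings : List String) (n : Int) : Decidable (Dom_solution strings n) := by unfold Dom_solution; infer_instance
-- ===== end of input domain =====

-- B replaces A's composite-key sorting of intermediate [char, idx] / [word, char] lists with a
-- bucket/partition algorithm: sort the words once, then emit per-character buckets in char order.

-- ===== PORT A =====
-- enumerate(strings) → PySem.List.enumerate strings (pairs (idx, word), idx : Int, as in Python).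
-- word[n] → PySem.Str.pyGet? (none = IndexError, excluded by Pre_; .getD ' ' is never taken under Pre_).
-- k.sort() compares the [char, idx] lists elementwise = sorted2 by (fst, snd).
def solution (strings : List String) (n : Int) : List String :=
  let k := (PySem.List.enumerate strings).foldl
    (fun acc iw => acc ++ [(((PySem.Str.pyGet? iw.2 n).getD ' '), iw.1)]) []
  let ks := PySem.List.sorted2 k (fun p => p.1) (fun p => p.2)
  let temp := ks.foldl
    (fun acc ss => acc ++ [(((PySem.List.pyGet? strings ss.2).getD ""), ss.1)]) []
  let ts := PySem.List.sorted2 temp (fun x => x.2) (fun x => x.1)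
  ts.foldl (fun acc w => acc ++ [w.1]) []

-- ===== PORT B =====
-- ordered = sorted(strings); chars = sorted({w[n] for w in ordered}); then the two nested loops
-- appending each word of `ordered` whose nth char is the current bucket character.
def solution_alt (strings : List String) (n : Int) : List String :=
  let ordered := PySem.List.sorted strings (fun w => w) false
  let chars := PySem.List.sorted
    (PySem.Set.ofList (ordered.map (fun w => (PySem.Str.pyGet? w n).getD ' '))) (fun c => c) false
  chars.foldl (fun answer ch =>
    ordered.foldl (fun a w =>
      if ((PySem.Str.pyGet? w n).getD ' ') == ch then a ++ [w] else a) answer) []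

-- ===== PRECONDITION & SPEC =====
-- Pre_ excludes exactly the inputs where Python A raises IndexError on word[n]
-- (some word with not -len(word) ≤ n < len(word)); B raises there too.
def Pre_solution (strings : List String) (n : Int) : Prop :=
  ∀ s ∈ strings, (PySem.Str.pyGet? s n).isSome = true
instance (strings : List String) (n : Int) : Decidable (Pre_solution strings n) := by
  unfold Pre_solution; infer_instance

def pvWitness_solution : List String × Int := (["bed", "car", "cab", "bed"], 1)

def Spec_solution (strings : List String) (n : Int) (out : List String) : Prop := out = solution_alt strings n
instance (strings : List String) (n : Int) (out : List String) : Decidable (Spec_solution strings n out) := by unfold Spec_solution; infer_instance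

-- ===== CLAIM (what is proved, stated in full; the proofs are below) =====
def Claim_equal_solution : Prop := ∀ (strings : List String) (n : Int), Dom_solution strings n → Pre_solution strings n → Spec_solution strings n (solution strings n)

-- ===== LEMMAS AND PROOFS =====

-- insertBy preserves Pairwise R when `before` decides a total transitive relation R.
theorem insertBy_pairwise_of {α : Type} (R : α → α → Prop) (before : α → α → Bool)
    (h1 : ∀ a b, before a b = true → R a b) (h2 : ∀ a b, before a b = false → R b a)
    (htr : ∀ a b c, R a b → R b c → R a c) (x : α) :
    ∀ ys : List α, ys.Pairwise R → (PySem.List.insertBy before x ys).Pairwise R := by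
  intro ys
  induction ys with
  | nil => intro _; simp [PySem.List.insertBy]
  | cons y ys ih =>
    intro h
    rcases List.pairwise_cons.mp h with ⟨hy, hys⟩
    by_cases hb : before x y = true
    · simp [PySem.List.insertBy, hb]
      refine ⟨⟨h1 _ _ hb, fun z hz => htr _ _ _ (h1 _ _ hb) (hy z hz)⟩, hy, hys⟩
    · simp [PySem.List.insertBy, hb]
      refine ⟨?_, ih hys⟩
      intro z hz
      rcases (PySem.List.insertBy_mem_iff before x z ys).mp hz with rfl | hz
      · exact h2 _ _ (by simpa using hb)
      · exact hy z hz

theorem foldl_insertBy_pairwise {α : Type} (R : α → α → Prop) (before : α → α → Bool)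
    (h1 : ∀ a b, before a b = true → R a b) (h2 : ∀ a b, before a b = false → R b a)
    (htr : ∀ a b c, R a b → R b c → R a c) (xs : List α) :
    ∀ acc : List α, acc.Pairwise R →
      (xs.foldl (fun acc x => PySem.List.insertBy before x acc) acc).Pairwise R := by
  induction xs with
  | nil => intro acc h; simpa using h
  | cons x xs ih =>
    intro acc h
    exact ih _ (insertBy_pairwise_of R before h1 h2 htr x acc h)

-- sorted2 output is pairwise ordered by the lexicographic (k1, k2) relation.
theorem sorted2_pairwise {α κ₁ κ₂ : Type} [LinearOrder κ₁] [LinearOrder κ₂]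
    (xs : List α) (k1 : α → κ₁) (k2 : α → κ₂) :
    (PySem.List.sorted2 xs k1 k2).Pairwise
      (fun a b => k1 a < k1 b ∨ (k1 a = k1 b ∧ k2 a ≤ k2 b)) := by
  unfold PySem.List.sorted2
  simp only []
  refine foldl_insertBy_pairwise _ _ ?_ ?_ ?_ xs [] (by simp)
  · intro a b hb
    by_cases h : k1 a < k1 b
    · exact Or.inl h
    · simp [h] at hb
      exact Or.inr ⟨le_antisymm hb.1 (not_lt.mp h), le_of_lt hb.2⟩
  · intro a b hb
    by_cases h : k1 a < k1 b
    · simp [h] at hb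
    · simp [h] at hb
      by_cases h' : k1 b < k1 a
      · exact Or.inl h'
      · exact Or.inr ⟨le_antisymm (not_lt.mp h) (not_lt.mp h'), hb (not_lt.mp h')⟩
  · intro a b c hab hbc
    rcases hab with hab | ⟨hab, hab2⟩ <;> rcases hbc with hbc | ⟨hbc, hbc2⟩
    · exact Or.inl (hab.trans hbc)
    · exact Or.inl (hbc ▸ hab)
    · exact Or.inl (hab ▸ hbc)
    · exact Or.inr ⟨hab.trans hbc, hab2.trans hbc2⟩

-- the lexicographic key used to pin down both results
theorem key_injective {n : Int} :
    Function.Injective (fun w : String => toLex (((PySem.Str.pyGet? w n).getD ' '), w)) := by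
  intro a b h
  have := congrArg (fun p : Lex (Char × String) => (ofLex p).2) h
  simpa using this

theorem mem_sorted2 {α κ₁ κ₂ : Type} [LT κ₁] [DecidableLT κ₁] [LT κ₂] [DecidableLT κ₂]
    (xs : List α) (k1 : α → κ₁) (k2 : α → κ₂) {x : α}
    (h : x ∈ PySem.List.sorted2 xs k1 k2) : x ∈ xs :=
  (PySem.List.sorted2_perm xs k1 k2 false).mem_iff.mp h

-- partitioning a list by a covering, duplicate-free list of key values is a permutation
theorem perm_flatMap_filter {α β : Type} [DecidableEq β] (f : α → β) :
    ∀ (cs : List β) (l : List α), cs.Nodup → (∀ x ∈ l, f x ∈ cs) →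
      (cs.flatMap (fun c => l.filter (fun x => f x == c))).Perm l := by
  intro cs
  induction cs with
  | nil =>
    intro l _ hcov
    have : l = [] := List.eq_nil_iff_forall_not_mem.mpr (fun x hx => by simpa using hcov x hx)
    simp [this]
  | cons c cs ih =>
    intro l hnd hcov
    rcases List.nodup_cons.mp hnd with ⟨hc, hnd'⟩
    set l' := l.filter (fun x => !(f x == c)) with hl'
    have hrw : ∀ c' ∈ cs, l.filter (fun x => f x == c') = l'.filter (fun x => f x == c') := by
      intro c' hc'
      rw [hl', List.filter_filter]
      refine (List.filter_congr ?_).symm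
      intro x _
      by_cases h : f x = c'
      · have hcc : c' ≠ c := fun hh => hc (hh ▸ hc')
        simp [h, hcc]
      · simp [h]
    have hperm' : (cs.flatMap (fun c' => l.filter (fun x => f x == c'))).Perm l' := by
      rw [List.flatMap_congr hrw]
      refine ih l' hnd' ?_
      intro x hx
      have hxl : x ∈ l := List.mem_of_mem_filter hx
      have hne : ¬(f x = c) := by
        have := List.of_mem_filter hx
        simpa using this
      rcases List.mem_cons.mp (hcov x hxl) with h | h
      · exact absurd h hne
      · exact h
    have hstep : (List.flatMap (fun c' => l.filter (fun x => f x == c')) (c :: cs))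
        = l.filter (fun x => f x == c) ++ cs.flatMap (fun c' => l.filter (fun x => f x == c')) := by
      simp [List.flatMap_cons]
    rw [hstep]
    refine (hperm'.append_left _).trans ?_
    have := List.filter_append_perm (fun x => f x == c) l
    simpa [hl'] using this

-- ===== VERDICT (by name: the statement is the Claim_ definition above) =====
theorem solution_spec : Claim_equal_solution := by
  intro strings n _ hpre
  unfold Spec_solution solution solution_alt
  simp only [PySem.List.foldl_append_singleton_eq_map, List.nil_append]
  set c : String → Char := fun w => (PySem.Str.pyGet? w n).getD ' ' with hc
  -- ---------- A's side: permutation of strings, pairwise ≤ under the lex key ----------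
  set k : List (Char × Int) := (PySem.List.enumerate strings).map (fun iw => (c iw.2, iw.1)) with hk
  set ks := PySem.List.sorted2 k (fun p => p.1) (fun p => p.2) with hks
  have hmemk : ∀ p ∈ ks, ∃ w, strings[p.2.toNat]? = some w ∧ p = (c w, (p.2.toNat : Int)) := by
    intro p hp
    have hp' : p ∈ k := mem_sorted2 _ _ _ hp
    rw [hk] at hp'
    rcases List.mem_map.mp hp' with ⟨iw, hiw, rfl⟩
    rcases (PySem.List.mem_enumerate_iff strings 0 iw).mp hiw with ⟨kk, hklt, rfl⟩
    refine ⟨strings[kk], ?_, by simp⟩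
    simp [List.getElem?_eq_getElem hklt]
  set temp := ks.map (fun ss => (((PySem.List.pyGet? strings ss.2).getD ""), ss.1)) with htemp
  have hmemt : ∀ q ∈ temp, q.2 = c q.1 ∧ q.1 ∈ strings := by
    intro q hq
    rw [htemp] at hq
    rcases List.mem_map.mp hq with ⟨ss, hss, rfl⟩
    rcases hmemk ss hss with ⟨w, hw, hsseq⟩
    have h2 : ss.2 = ((ss.2.toNat : Nat) : Int) := congrArg Prod.snd hsseq
    have hget : PySem.List.pyGet? strings ss.2 = some w := by
      rw [h2, PySem.List.pyGet?_natCast]; exact hw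
    have h1 : ss.1 = c w := congrArg Prod.fst hsseq
    exact ⟨by simp [hget, h1], by simp [hget]; exact List.mem_of_getElem? hw⟩
  set ts := PySem.List.sorted2 temp (fun x => x.2) (fun x => x.1) with hts
  have hpermA : (ts.map (fun w => w.1)).Perm strings := by
    have h1 : (ts.map (fun w => w.1)).Perm (temp.map (fun w => w.1)) :=
      (PySem.List.sorted2_perm temp _ _ false).map _
    have h2 : (temp.map (fun w => w.1)).Perm (k.map (fun ss => (PySem.List.pyGet? strings ss.2).getD "")) := by
      rw [htemp, List.map_map]
      exact ((PySem.List.sorted2_perm k _ _ false).map _)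
    have h3 : k.map (fun ss => (PySem.List.pyGet? strings ss.2).getD "") = strings := by
      rw [hk, List.map_map]
      have : ∀ iw ∈ PySem.List.enumerate strings 0,
          ((fun ss : Char × Int => (PySem.List.pyGet? strings ss.2).getD "") ∘
            (fun iw : Int × String => (c iw.2, iw.1))) iw = iw.2 := by
        intro iw hiw
        rcases (PySem.List.mem_enumerate_iff strings 0 iw).mp hiw with ⟨kk, hklt, rfl⟩
        simp [Function.comp, PySem.List.pyGet?_natCast, List.getElem?_eq_getElem hklt]
      rw [List.map_congr_left this]
      exact PySem.List.map_snd_enumerate strings 0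
    rw [h3] at h2
    exact h1.trans h2
  set key : String → Lex (Char × String) := fun w => toLex (c w, w) with hkey
  have hpwA : (ts.map (fun w => w.1)).Pairwise (fun a b => key a ≤ key b) := by
    rw [List.pairwise_map]
    have hpw := sorted2_pairwise temp (fun x => x.2) (fun x => x.1)
    rw [← hts] at hpw
    refine hpw.imp_of_mem ?_
    intro a b ha hb h
    have ha' := hmemt a (mem_sorted2 _ _ _ ha)
    have hb' := hmemt b (mem_sorted2 _ _ _ hb)
    rw [hkey, Prod.Lex.toLex_le_toLex]
    rw [ha'.1, hb'.1] at h
    exact h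
  -- ---------- B's side: the partition is a permutation of strings, pairwise ≤ under the key ----------
  set ordered := PySem.List.sorted strings (fun w => w) false with hordered
  set chars := PySem.List.sorted (PySem.Set.ofList (ordered.map c)) (fun ch => ch) false with hchars
  have hBflat :
      chars.foldl (fun answer ch =>
        ordered.foldl (fun a w => if c w == ch then a ++ [w] else a) answer) []
      = chars.flatMap (fun ch => ordered.filter (fun w => c w == ch)) := by
    simp only [PySem.List.foldl_append_if_eq_filter]
    have := PySem.List.foldl_append_eq_flatMap
      (fun ch => ordered.filter (fun w => c w == ch)) chars ([] : List String)
    simpa using this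
  have hndchars : chars.Nodup :=
    ((PySem.List.sorted_perm (PySem.Set.ofList (ordered.map c)) (fun ch => ch) false).symm.nodup
      (PySem.Set.nodup_ofList _))
  have hcov : ∀ w ∈ ordered, c w ∈ chars := by
    intro w hw
    rw [hchars, PySem.List.mem_sorted, PySem.Set.mem_ofList]
    exact List.mem_map_of_mem hw
  have hpermB :
      (chars.flatMap (fun ch => ordered.filter (fun w => c w == ch))).Perm strings := by
    refine (perm_flatMap_filter c chars ordered hndchars hcov).trans ?_
    exact PySem.List.sorted_perm strings (fun w => w) false
  have hordpw : ordered.Pairwise (fun a b => a ≤ b) := by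
    have := PySem.List.sorted_pairwise strings (fun w => w)
    simpa [hordered] using this
  have hcharspw : chars.Pairwise (fun a b => a < b) := by
    rw [hchars]
    exact PySem.List.sorted_ofList_pairwise_lt (ordered.map c)
  have hpwB :
      (chars.flatMap (fun ch => ordered.filter (fun w => c w == ch))).Pairwise
        (fun a b => key a ≤ key b) := by
    rw [List.pairwise_flatMap]
    constructor
    · intro ch _
      have hsub : (ordered.filter (fun w => c w == ch)).Pairwise (fun a b => a ≤ b) :=
        List.Pairwise.sublist List.filter_sublist hordpw
      refine hsub.imp_of_mem ?_
      intro a b ha hb hab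
      have ha' : c a = ch := by simpa using List.of_mem_filter ha
      have hb' : c b = ch := by simpa using List.of_mem_filter hb
      rw [hkey, Prod.Lex.toLex_le_toLex]
      exact Or.inr ⟨ha'.trans hb'.symm, hab⟩
    · refine hcharspw.imp_of_mem ?_
      intro c1 c2 _ _ hlt a ha b hb
      have ha' : c a = c1 := by simpa using List.of_mem_filter ha
      have hb' : c b = c2 := by simpa using List.of_mem_filter hb
      rw [hkey, Prod.Lex.toLex_le_toLex]
      exact Or.inl (by rw [ha', hb']; exact hlt)
  -- ---------- both are the same rearrangement ----------
  rw [hBflat]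
  exact PySem.List.eq_of_perm_of_pairwise_le_of_injective key key_injective
    (hpermA.trans hpermB.symm) hpwA hpwB
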